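-- pv_equiv track=rewrite | github.com/yonasman/DSA-Practice | sorting.py | largest_number_after_mutation
-- ===== SOURCE A (Python) =====
-- def largest_number_after_mutation(nums,mutations):
--     mutation_dict = {a:b for a,b in mutations}
--     # apply the mutations
--     mutation_nums = [mutation_dict.get(num,num) for num in nums]
--     n = len(mutation_nums)
--     for i in range(1,n):
--         key = mutation_nums[i]
--         j = i - 1
--         while j >= 0 and key < mutation_nums[j]:
--             mutation_nums[j+1] = mutation_nums[j]
--             j -= 1
--         mutation_nums[j+1] = key
--     return mutation_nums
-- ===== SOURCE B (Python) =====
-- def largest_number_after_mutation(nums, mutations):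
--     mutation_dict = {a: b for a, b in mutations}
--     # apply the mutations (same as A), then sort by merge sort instead of insertion sort
--     mutation_nums = [mutation_dict.get(num, num) for num in nums]
--     return _msort(mutation_nums)
--
--
-- def _msort(xs):
--     if len(xs) <= 1:
--         return xs
--     mid = len(xs) // 2
--     left = _msort(xs[:mid])
--     right = _msort(xs[mid:])
--     out = []
--     i = j = 0
--     while i < len(left) and j < len(right):
--         if left[i] <= right[j]:
--             out.append(left[i])
--             i += 1
--         else:
--             out.append(right[j])
--             j += 1
--     out.extend(left[i:])
--     out.extend(right[j:])
--     return out
-- ===== Notes on version B (the rewrite author's own statement) =====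
-- stated objective: faster
-- what changed: The value-mutation mapping is kept, but the O(n^2) in-place insertion sort is replaced by a recursive top-down merge sort (split at mid, sort halves, merge).
import Mathlib
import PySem

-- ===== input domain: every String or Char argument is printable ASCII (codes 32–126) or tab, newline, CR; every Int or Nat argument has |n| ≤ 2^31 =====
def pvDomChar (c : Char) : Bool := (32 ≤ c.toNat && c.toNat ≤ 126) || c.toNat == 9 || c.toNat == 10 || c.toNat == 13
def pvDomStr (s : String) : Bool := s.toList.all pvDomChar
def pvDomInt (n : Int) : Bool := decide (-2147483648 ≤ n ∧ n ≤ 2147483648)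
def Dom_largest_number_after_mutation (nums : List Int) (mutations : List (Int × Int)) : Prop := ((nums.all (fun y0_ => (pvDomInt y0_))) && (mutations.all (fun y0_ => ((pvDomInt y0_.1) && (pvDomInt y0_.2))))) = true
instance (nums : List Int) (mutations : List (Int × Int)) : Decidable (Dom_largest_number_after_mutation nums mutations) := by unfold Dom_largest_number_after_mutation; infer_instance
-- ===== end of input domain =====

-- B replaces A's O(n^2) in-place insertion sort by a recursive merge sort; the mutation mapping is unchanged.

-- ===== PORT A =====
-- inner while loop of A: the sorted prefix is scanned and `key` is placed
-- after the last element ≤ key (i.e. before the first element with key < it)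
def pvInsertKey (key : Int) : List Int → List Int
  | [] => [key]
  | b :: l => if key < b then key :: b :: l else b :: pvInsertKey key l

def largest_number_after_mutation (nums : List Int) (mutations : List (Int × Int)) : List Int :=
  let mutation_dict := PySem.Dict.ofList mutations
  let mutation_nums := nums.map (fun num => mutation_dict.getD num num)
  -- for i in range(1, n): insert mutation_nums[i] into the sorted prefix
  mutation_nums.foldl (fun acc key => pvInsertKey key acc) []

-- ===== PORT B =====
-- merge of Source B's while loop over two index pointers
def pvMerge : List Int → List Int → List Int
  | [], ys => ys
  | x :: xs, [] => x :: xs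
  | x :: xs, y :: ys => if x ≤ y then x :: pvMerge xs (y :: ys) else y :: pvMerge (x :: xs) ys

def pvMsort (l : List Int) : List Int :=
  if h : l.length ≤ 1 then l
  else
    pvMerge (pvMsort (l.take (l.length / 2))) (pvMsort (l.drop (l.length / 2)))
termination_by l.length
decreasing_by
  · simp only [List.length_take]; omega
  · simp only [List.length_drop]; omega

def largest_number_after_mutation_alt (nums : List Int) (mutations : List (Int × Int)) : List Int :=
  let mutation_dict := PySem.Dict.ofList mutations
  let mutation_nums := nums.map (fun num => mutation_dict.getD num num)
  pvMsort mutation_nums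

-- ===== PRECONDITION & SPEC =====
def Spec_largest_number_after_mutation (nums : List Int) (mutations : List (Int × Int)) (out : List Int) : Prop := out = largest_number_after_mutation_alt nums mutations
instance (nums : List Int) (mutations : List (Int × Int)) (out : List Int) : Decidable (Spec_largest_number_after_mutation nums mutations out) := by unfold Spec_largest_number_after_mutation; infer_instance

-- ===== CLAIM (what is proved, stated in full; the proofs are below) =====
def Claim_equal_largest_number_after_mutation : Prop := ∀ (nums : List Int) (mutations : List (Int × Int)), Dom_largest_number_after_mutation nums mutations → Spec_largest_number_after_mutation nums mutations (largest_number_after_mutation nums mutations)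

-- ===== LEMMAS AND PROOFS =====

theorem pvInsertKey_perm (a : Int) (l : List Int) : (pvInsertKey a l).Perm (a :: l) := by
  induction l with
  | nil => simp [pvInsertKey]
  | cons b l ih =>
    simp only [pvInsertKey]
    split
    · exact List.Perm.refl _
    · exact (ih.cons b).trans (List.Perm.swap a b l)

theorem pvInsertKey_sorted (a : Int) (l : List Int) (h : l.Pairwise (· ≤ ·)) :
    (pvInsertKey a l).Pairwise (· ≤ ·) := by
  induction l with
  | nil => simp [pvInsertKey]
  | cons b l ih =>
    rw [List.pairwise_cons] at h
    simp only [pvInsertKey]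
    split
    · rename_i hab
      rw [List.pairwise_cons]
      refine ⟨?_, List.pairwise_cons.mpr h⟩
      intro c hc
      rcases List.mem_cons.mp hc with hc | hc
      · omega
      · exact le_of_lt (lt_of_lt_of_le hab (h.1 c hc))
    · rename_i hab
      rw [List.pairwise_cons]
      refine ⟨?_, ih h.2⟩
      intro c hc
      rcases List.mem_cons.mp ((pvInsertKey_perm a l).mem_iff.mp hc) with hc' | hc'
      · omega
      · exact h.1 c hc'

theorem foldl_insert_sorted_perm (l acc : List Int) (h : acc.Pairwise (· ≤ ·)) :
    (l.foldl (fun acc key => pvInsertKey key acc) acc).Pairwise (· ≤ ·) ∧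
    (l.foldl (fun acc key => pvInsertKey key acc) acc).Perm (acc ++ l) := by
  induction l generalizing acc with
  | nil => simpa using h
  | cons x l ih =>
    simp only [List.foldl_cons]
    obtain ⟨hs, hp⟩ := ih (pvInsertKey x acc) (pvInsertKey_sorted x acc h)
    exact ⟨hs, hp.trans (((pvInsertKey_perm x acc).append_right l).trans List.perm_middle.symm)⟩

theorem pvMerge_perm (xs ys : List Int) : (pvMerge xs ys).Perm (xs ++ ys) := by
  induction xs, ys using pvMerge.induct with
  | case1 ys => simp [pvMerge]
  | case2 x xs => simp [pvMerge]
  | case3 x xs y ys h ih =>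
    simp only [pvMerge, if_pos h]
    exact ih.cons x
  | case4 x xs y ys h ih =>
    simp only [pvMerge, if_neg h]
    exact (ih.cons y).trans List.perm_middle.symm

theorem pvMerge_sorted (xs ys : List Int) (hx : xs.Pairwise (· ≤ ·)) (hy : ys.Pairwise (· ≤ ·)) :
    (pvMerge xs ys).Pairwise (· ≤ ·) := by
  induction xs, ys using pvMerge.induct with
  | case1 ys => simpa [pvMerge] using hy
  | case2 x xs => simpa [pvMerge] using hx
  | case3 x xs y ys h ih =>
    rw [List.pairwise_cons] at hx
    simp only [pvMerge, if_pos h]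
    rw [List.pairwise_cons]
    refine ⟨?_, ih hx.2 hy⟩
    intro c hc
    rw [List.pairwise_cons] at hy
    rcases List.mem_append.mp ((pvMerge_perm xs (y :: ys)).mem_iff.mp hc) with hc' | hc'
    · exact hx.1 c hc'
    · rcases List.mem_cons.mp hc' with hc' | hc'
      · omega
      · exact le_trans h (hy.1 c hc')
  | case4 x xs y ys h ih =>
    rw [List.pairwise_cons] at hy
    simp only [pvMerge, if_neg h]
    rw [List.pairwise_cons]
    refine ⟨?_, ih hx hy.2⟩
    intro c hc
    rw [List.pairwise_cons] at hx
    rcases List.mem_append.mp ((pvMerge_perm (x :: xs) ys).mem_iff.mp hc) with hc' | hc'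
    · rcases List.mem_cons.mp hc' with hc' | hc'
      · omega
      · exact le_trans (by omega) (hx.1 c hc')
    · exact hy.1 c hc'

theorem pvMsort_perm (l : List Int) : (pvMsort l).Perm l := by
  induction l using pvMsort.induct with
  | case1 l h => rw [pvMsort, dif_pos h]
  | case2 l h ih1 ih2 =>
    rw [pvMsort, dif_neg h]
    have hmid := ih1.append ih2
    rw [List.take_append_drop] at hmid
    exact (pvMerge_perm _ _).trans hmid

theorem pvMsort_sorted (l : List Int) : (pvMsort l).Pairwise (· ≤ ·) := by
  induction l using pvMsort.induct with
  | case1 l h =>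
    rw [pvMsort, dif_pos h]
    match l, h with
    | [], _ => exact List.Pairwise.nil
    | [a], _ => exact List.pairwise_singleton _ a
  | case2 l h ih1 ih2 =>
    rw [pvMsort, dif_neg h]
    exact pvMerge_sorted _ _ ih1 ih2

theorem foldl_insert_eq_msort (l : List Int) :
    l.foldl (fun acc key => pvInsertKey key acc) [] = pvMsort l := by
  obtain ⟨hs, hp⟩ := foldl_insert_sorted_perm l [] List.Pairwise.nil
  exact List.Perm.eq_of_pairwise' hs (pvMsort_sorted l) (hp.trans (pvMsort_perm l).symm)

-- ===== VERDICT (by name: the statement is the Claim_ definition above) =====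
theorem largest_number_after_mutation_spec : Claim_equal_largest_number_after_mutation := by
  intro nums mutations _
  unfold Spec_largest_number_after_mutation
  unfold largest_number_after_mutation largest_number_after_mutation_alt
  exact foldl_insert_eq_msort _
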